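-- pv_equiv track=rewrite | github.com/Novus-Engine/novuspack | scripts/lib/_validate_heading_numbering_title_case.py | find_backtick_ranges
-- ===== SOURCE A (Python) =====
-- def find_backtick_ranges(text):
--     """Find all backtick-enclosed sections and their positions."""
--     backtick_ranges = []
--     i = 0
--     while i < len(text):
--         if text[i] == '`':
--             start = i
--             i += 1
--             while i < len(text) and text[i] != '`':
--                 i += 1
--             if i < len(text):
--                 end = i + 1
--                 backtick_ranges.append((start, end))
--                 i = end
--             else:
--                 break
--         else:
--             i += 1
--     return backtick_ranges
-- ===== SOURCE B (Python) =====
-- def find_backtick_ranges(text):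
--     """Find all backtick-enclosed sections and their positions."""
--     pos = [i for i, c in enumerate(text) if c == '`']
--     out = []
--     while len(pos) >= 2:
--         out.append((pos[0], pos[1] + 1))
--         pos = pos[2:]
--     return out
-- ===== Notes on version B (the rewrite author's own statement) =====
-- stated objective: simpler
-- what changed: Replaces A's nested while-loop scan (outer scan for an opening backtick, inner re-scan for the closing one, with index jumps) by two flat passes: collect all backtick positions with one enumerate comprehension, then consume that position list in non-overlapping pairs; an unmatched trailing backtick is dropped because no second element is left to pair with.
import Mathlib
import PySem

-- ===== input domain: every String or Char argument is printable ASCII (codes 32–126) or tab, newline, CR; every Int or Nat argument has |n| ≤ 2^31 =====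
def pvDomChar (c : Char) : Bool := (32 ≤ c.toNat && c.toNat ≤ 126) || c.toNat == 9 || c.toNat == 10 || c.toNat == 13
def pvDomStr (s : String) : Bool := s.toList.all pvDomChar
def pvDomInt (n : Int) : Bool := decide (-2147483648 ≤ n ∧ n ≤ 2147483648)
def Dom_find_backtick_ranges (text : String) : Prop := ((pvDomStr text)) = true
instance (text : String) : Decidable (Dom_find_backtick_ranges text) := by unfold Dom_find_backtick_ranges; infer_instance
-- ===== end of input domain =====

-- B replaces A's nested scan-and-rescan while loop by two flat passes (collect all
-- backtick positions, then pair them up non-overlappingly); objective: simpler, not faster.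

-- ===== PORT A =====
-- inner while loop: scan forward from offset j for the closing backtick; returns its
-- index and the remaining text after it (none = ran off the end, Python's 'break' case)
def pvScanClose : List Char → Int → Option (Int × List Char)
  | [], _ => none
  | c :: rest, j => if c = '`' then some (j, rest) else pvScanClose rest (j + 1)

theorem pvScanClose_length : ∀ (cs : List Char) (j : Int) (p : Int) (rest' : List Char),
    pvScanClose cs j = some (p, rest') → rest'.length ≤ cs.length := by
  intro cs
  induction cs with
  | nil => intro j p rest' h; simp [pvScanClose] at h
  | cons c rest ih =>
    intro j p rest' h
    simp only [pvScanClose] at h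
    split at h
    · cases h; simp
    · exact Nat.le_trans (ih _ _ _ h) (Nat.le_succ _)

-- outer while loop: i is the current offset, the list is text[i:]
def pvGoA (cs : List Char) (i : Int) : List (Int × Int) :=
  match cs with
  | [] => []
  | c :: rest =>
    if c = '`' then
      match h : pvScanClose rest (i + 1) with
      | some (j, rest') => (i, j + 1) :: pvGoA rest' (j + 1)
      | none => []
    else pvGoA rest (i + 1)
termination_by cs.length
decreasing_by
· exact Nat.lt_succ_of_le (pvScanClose_length _ _ _ _ h)
· simp

def find_backtick_ranges (text : String) : List (Int × Int) := pvGoA text.toList 0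

-- ===== PORT B =====
-- pos = [i for i, c in enumerate(text) if c == '`']
def pvPosB (text : String) : List Int :=
  (PySem.List.enumerate text.toList 0).filterMap (fun p => if p.2 = '`' then some p.1 else none)

-- while len(pos) >= 2: append (pos[0], pos[1] + 1); pos = pos[2:]
def pvPairUp : List Int → List (Int × Int)
  | a :: b :: rest => (a, b + 1) :: pvPairUp rest
  | _ => []

def find_backtick_ranges_alt (text : String) : List (Int × Int) := pvPairUp (pvPosB text)

-- ===== PRECONDITION & SPEC =====
def Spec_find_backtick_ranges (text : String) (out : List (Int × Int)) : Prop := out = find_backtick_ranges_alt text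
instance (text : String) (out : List (Int × Int)) : Decidable (Spec_find_backtick_ranges text out) := by unfold Spec_find_backtick_ranges; infer_instance

-- ===== CLAIM (what is proved, stated in full; the proofs are below) =====
def Claim_equal_find_backtick_ranges : Prop := ∀ (text : String), Dom_find_backtick_ranges text → Spec_find_backtick_ranges text (find_backtick_ranges text)

-- ===== LEMMAS AND PROOFS =====

-- backtick positions of cs, where cs starts at offset i (reference list for both sides)
def pvPositions : List Char → Int → List Int
  | [], _ => []
  | c :: rest, i => if c = '`' then i :: pvPositions rest (i + 1) else pvPositions rest (i + 1)

theorem pvPosB_eq_positions : ∀ (cs : List Char) (i : Int),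
    (PySem.List.enumerate cs i).filterMap (fun p => if p.2 = '`' then some p.1 else none)
      = pvPositions cs i := by
  intro cs
  induction cs with
  | nil => intro i; simp [PySem.List.enumerate_nil, pvPositions]
  | cons c rest ih =>
    intro i
    by_cases hc : c = '`' <;>
      simp [PySem.List.enumerate_cons, pvPositions, hc, ih]

theorem pvScanClose_positions : ∀ (cs : List Char) (j : Int),
    (pvScanClose cs j = none ∧ pvPositions cs j = []) ∨
    (∃ p rest', pvScanClose cs j = some (p, rest') ∧
      pvPositions cs j = p :: pvPositions rest' (p + 1)) := by
  intro cs
  induction cs with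
  | nil => intro j; left; simp [pvScanClose, pvPositions]
  | cons c rest ih =>
    intro j
    by_cases hc : c = '`'
    · right
      exact ⟨j, rest, by simp [pvScanClose, hc], by simp [pvPositions, hc]⟩
    · rcases ih (j + 1) with ⟨h1, h2⟩ | ⟨p, rest', h1, h2⟩
      · left; simp [pvScanClose, pvPositions, hc, h1, h2]
      · right; exact ⟨p, rest', by simp [pvScanClose, hc, h1], by simp [pvPositions, hc, h2]⟩

theorem pvGoA_eq_pairUp : ∀ (n : Nat) (cs : List Char), cs.length ≤ n →
    ∀ (i : Int), pvGoA cs i = pvPairUp (pvPositions cs i) := by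
  intro n
  induction n with
  | zero =>
    intro cs hlen i
    have : cs = [] := List.length_eq_zero_iff.mp (Nat.le_zero.mp hlen)
    subst this; simp [pvGoA, pvPositions, pvPairUp]
  | succ n ih =>
    intro cs hlen i
    match cs with
    | [] => simp [pvGoA, pvPositions, pvPairUp]
    | c :: rest =>
      have hrest : rest.length ≤ n := Nat.le_of_succ_le_succ hlen
      by_cases hc : c = '`'
      · rcases pvScanClose_positions rest (i + 1) with ⟨h1, h2⟩ | ⟨p, rest', h1, h2⟩
        · unfold pvGoA
          rw [if_pos hc]
          simp only [pvPositions, if_pos hc, h2, pvPairUp]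
          split <;> simp_all
        · have hr' : rest'.length ≤ n :=
            Nat.le_trans (pvScanClose_length rest (i + 1) p rest' h1) hrest
          unfold pvGoA
          rw [if_pos hc]
          simp only [pvPositions, if_pos hc, h2, pvPairUp]
          split
          · rename_i j r' heq
            rw [h1] at heq
            cases heq
            rw [ih rest' hr' _]
          · rename_i heq
            rw [h1] at heq
            cases heq
      · simp only [pvGoA, if_neg hc, pvPositions]
        exact ih rest hrest (i + 1)

-- ===== VERDICT (by name: the statement is the Claim_ definition above) =====
theorem find_backtick_ranges_spec : Claim_equal_find_backtick_ranges := by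
  intro text _
  unfold Spec_find_backtick_ranges find_backtick_ranges find_backtick_ranges_alt pvPosB
  rw [pvPosB_eq_positions, pvGoA_eq_pairUp text.toList.length text.toList (Nat.le_refl _) 0]
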